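-- pv_equiv track=rewrite | github.com/Bagusdevaa/Chat-with-PDF | app/models/pdf_processor.py | search_relevant_content
-- ===== SOURCE A (Python) =====
-- def search_relevant_content(vectorstore, question):
--     """
--     Search for relevant content chunks based on the question.
--     Fallback implementation for when LangChain is not available.
--     """
--     if not vectorstore or not vectorstore.get('chunks'):
--         return []
--
--     chunks = vectorstore.get('chunks', [])
--     question_lower = question.lower()
--
--     # Simple keyword-based scoring
--     scored_chunks = []
--
--     for i, chunk in enumerate(chunks):
--         chunk_lower = chunk.lower()
--         score = 0
--
--         # Split question into words for better matching
--         question_words = question_lower.split()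
--
--         # Score based on word matches
--         for word in question_words:
--             if len(word) > 2:  # Only consider words longer than 2 characters
--                 if word in chunk_lower:
--                     score += 1
--                 # Bonus for exact phrase match
--                 if question_lower in chunk_lower:
--                     score += 3
--
--         if score > 0:
--             scored_chunks.append((chunk, score))
--
--     # Sort by score and return top chunks
--     scored_chunks.sort(key=lambda x: x[1], reverse=True)
--       # Return top 3 most relevant chunks
--     return [chunk for chunk, score in scored_chunks[:3]]
-- ===== SOURCE B (Python) =====
-- def search_relevant_content(vectorstore, question):
--     """
--     Search for relevant content chunks based on the question.
--     Single fused pass: hoists the qualifying question words and the phrase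
--     bonus out of the loop, and maintains a bounded top-3 list by ordered
--     insertion instead of building and sorting a full scored list.
--     """
--     if not vectorstore or not vectorstore.get('chunks'):
--         return []
--
--     chunks = vectorstore.get('chunks', [])
--     question_lower = question.lower()
--     qwords = [w for w in question_lower.split() if len(w) > 2]
--     bonus = 3 * len(qwords)
--
--     top = []  # at most 3 (chunk, score), score descending, ties in scan order
--     for chunk in chunks:
--         chunk_lower = chunk.lower()
--         score = sum(1 for w in qwords if w in chunk_lower) + (bonus if question_lower in chunk_lower else 0)
--         if score > 0:
--             i = 0
--             while i < len(top) and top[i][1] >= score: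
--                 i += 1
--             top.insert(i, (chunk, score))
--             if len(top) > 3:
--                 top.pop()
--     return [c for c, s in top]
-- ===== Notes on version B (the rewrite author's own statement) =====
-- stated objective: alternative
-- what changed: B replaces A's build-score-list-then-full-sort with a single fused pass that hoists the qualifying question words and phrase bonus out of the loop and maintains a bounded top-3 list by ordered insertion (no intermediate scored list, no sort).
import Mathlib
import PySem

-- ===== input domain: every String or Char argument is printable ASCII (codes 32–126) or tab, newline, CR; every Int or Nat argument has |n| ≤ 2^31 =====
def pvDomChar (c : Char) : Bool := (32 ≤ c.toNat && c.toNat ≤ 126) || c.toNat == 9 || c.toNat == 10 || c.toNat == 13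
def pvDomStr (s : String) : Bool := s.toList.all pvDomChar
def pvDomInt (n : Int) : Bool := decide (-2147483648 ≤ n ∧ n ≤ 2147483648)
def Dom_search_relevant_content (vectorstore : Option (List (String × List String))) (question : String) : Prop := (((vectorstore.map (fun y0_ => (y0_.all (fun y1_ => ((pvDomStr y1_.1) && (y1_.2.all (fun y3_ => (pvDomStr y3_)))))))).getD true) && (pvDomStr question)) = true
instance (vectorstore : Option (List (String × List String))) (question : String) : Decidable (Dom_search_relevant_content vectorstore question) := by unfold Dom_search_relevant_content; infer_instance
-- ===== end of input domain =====

-- B replaces A's build-scored-list-then-full-sort with one fused pass: hoisted qualifying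
-- words and phrase bonus, and a bounded top-3 list maintained by ordered insertion (objective: alternative).

-- ===== PORT A =====
-- A's inner per-word scoring loop (splits the question inside the per-chunk iteration, as A does)
def scoreLoopA (question_lower chunk_lower : String) : Int :=
  (PySem.Str.split₀ question_lower).foldl (fun s w =>
    if 2 < PySem.Str.len w then
      let s1 := if PySem.Str.isIn w chunk_lower then s + 1 else s
      if PySem.Str.isIn question_lower chunk_lower then s1 + 3 else s1
    else s) 0

def search_relevant_content (vectorstore : Option (List (String × List String))) (question : String) : List String :=
  match vectorstore with
  | none => []
  | some d =>
    if d = [] then [] else                              -- 'not vectorstore' on a dict = emptiness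
    match (PySem.Dict.mk d).get? "chunks" with
    | none => []                                        -- missing key: .get() gives falsy None
    | some cs =>
      if cs = [] then [] else                           -- 'not vectorstore.get("chunks")'
      let question_lower := PySem.Str.lower question
      let scored_chunks : List (String × Int) := cs.foldl (fun acc chunk =>
        let score := scoreLoopA question_lower (PySem.Str.lower chunk)
        if 0 < score then acc ++ [(chunk, score)] else acc) []
      ((PySem.List.sorted scored_chunks (fun x => x.2) true).take 3).map (fun x => x.1)

-- ===== PORT B =====
-- B's hoisted scoring: word hits over the precomputed qualifying words, plus the phrase bonus
def scoreB (qwords : List String) (bonus : Int) (question_lower chunk_lower : String) : Int :=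
  (qwords.countP (fun w => PySem.Str.isIn w chunk_lower) : Int)
    + (if PySem.Str.isIn question_lower chunk_lower then bonus else 0)

-- B's while-loop insertion: walk past the entries with score ≥ the new one, insert, cap at 3
def insertTop3 (x : String × Int) (top : List (String × Int)) : List (String × Int) :=
  (PySem.List.insertBy (fun a b => decide (b.2 < a.2)) x top).take 3

def search_relevant_content_alt (vectorstore : Option (List (String × List String))) (question : String) : List String :=
  match vectorstore with
  | none => []
  | some d =>
    if d = [] then [] else
    match (PySem.Dict.mk d).get? "chunks" with
    | none => []
    | some cs =>
      if cs = [] then [] else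
      let question_lower := PySem.Str.lower question
      let qwords := (PySem.Str.split₀ question_lower).filter (fun w => decide (2 < PySem.Str.len w))
      let bonus : Int := 3 * qwords.length
      let top : List (String × Int) := cs.foldl (fun top chunk =>
        let score := scoreB qwords bonus question_lower (PySem.Str.lower chunk)
        if 0 < score then insertTop3 (chunk, score) top else top) []
      top.map (fun x => x.1)

-- ===== PRECONDITION & SPEC =====
def Spec_search_relevant_content (vectorstore : Option (List (String × List String))) (question : String) (out : List String) : Prop := out = search_relevant_content_alt vectorstore question
instance (vectorstore : Option (List (String × List String))) (question : String) (out : List String) : Decidable (Spec_search_relevant_content vectorstore question out) := by unfold Spec_search_relevant_content; infer_instance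

-- ===== CLAIM =====
def Claim_equal_search_relevant_content : Prop := ∀ (vectorstore : Option (List (String × List String))) (question : String), Dom_search_relevant_content vectorstore question → Spec_search_relevant_content vectorstore question (search_relevant_content vectorstore question)

-- ===== LEMMAS AND PROOFS =====

-- A's inner per-word loop in closed form, from any accumulator
theorem scoreLoopA_general (ql cl : String) (l : List String) (s : Int) :
    l.foldl (fun s w =>
      if 2 < PySem.Str.len w then
        let s1 := if PySem.Str.isIn w cl then s + 1 else s
        if PySem.Str.isIn ql cl then s1 + 3 else s1
      else s) s
    = s + ((l.filter (fun w => decide (2 < PySem.Str.len w))).countP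
              (fun w => PySem.Str.isIn w cl) : Int)
        + (if PySem.Str.isIn ql cl then
             3 * ((l.filter (fun w => decide (2 < PySem.Str.len w))).length : Int) else 0) := by
  induction l generalizing s with
  | nil => simp
  | cons a t ih =>
    simp only [List.foldl_cons, List.filter_cons]
    by_cases hq : 2 < PySem.Str.len a
    · simp only [hq, if_true, decide_true]
      rw [ih]
      by_cases hp : PySem.Str.isIn ql cl = true
      · simp only [hp, if_true, List.countP_cons, List.length_cons]
        split_ifs <;> push_cast <;> ring
      · simp only [hp, List.countP_cons, Bool.false_eq_true, if_false]
        split_ifs <;> push_cast <;> ring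
    · simp only [hq, decide_false]
      rw [ih]
      simp

-- the two per-chunk scores agree
theorem score_eq (ql cl : String) :
    scoreLoopA ql cl
      = scoreB ((PySem.Str.split₀ ql).filter (fun w => decide (2 < PySem.Str.len w)))
          (3 * ((PySem.Str.split₀ ql).filter (fun w => decide (2 < PySem.Str.len w))).length)
          ql cl := by
  unfold scoreLoopA scoreB
  rw [scoreLoopA_general]
  by_cases hp : PySem.Str.isIn ql cl = true
  · simp only [hp, if_true]; ring
  · simp only [hp, Bool.false_eq_true, if_false]; ring

-- A's append-if fold builds the filtered, mapped list
theorem foldl_appendIf_eq (score : String → Int) (cs : List String) (acc : List (String × Int)) :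
    cs.foldl (fun acc c =>
        let s := score c
        if 0 < s then acc ++ [(c, s)] else acc) acc
      = acc ++ (cs.filter (fun c => decide (0 < score c))).map (fun c => (c, score c)) := by
  induction cs generalizing acc with
  | nil => simp
  | cons c t ih =>
    simp only [List.foldl_cons, List.filter_cons]
    by_cases h : 0 < score c
    · simp only [h, if_true, decide_true, List.map_cons]
      rw [ih]
      simp
    · simp only [h, if_false, decide_false, Bool.false_eq_true]
      rw [ih]

-- truncating after an insertion only depends on the truncated prefix
theorem take_insertBy (b : (String × Int) → (String × Int) → Bool) (x : String × Int) :
    ∀ (n : ℕ) (s : List (String × Int)),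
      (PySem.List.insertBy b x s).take n = (PySem.List.insertBy b x (s.take n)).take n := by
  intro n s
  induction s generalizing n with
  | nil => simp
  | cons y ys ih =>
    cases n with
    | zero => simp
    | succ m =>
      simp only [PySem.List.insertBy, List.take_succ_cons]
      by_cases h : b x y = true
      · simp only [h, if_true, List.take_succ_cons]
        congr 1
        have hy : (y :: ys.take m) = (y :: ys).take (m + 1) := rfl
        rw [hy, List.take_take]
        congr 1
        omega
      · simp only [h, Bool.false_eq_true, if_false, List.take_succ_cons]
        congr 1
        exact ih m

-- maintaining a capped list along the fold equals truncating the full insertion fold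
theorem foldl_insert_take (b : (String × Int) → (String × Int) → Bool) :
    ∀ (l : List (String × Int)) (acc : List (String × Int)),
      l.foldl (fun t x => (PySem.List.insertBy b x t).take 3) (acc.take 3)
        = (l.foldl (fun t x => PySem.List.insertBy b x t) acc).take 3 := by
  intro l
  induction l with
  | nil => intro acc; rfl
  | cons x xs ih =>
    intro acc
    simp only [List.foldl_cons]
    rw [← take_insertBy b x 3 acc, ih (PySem.List.insertBy b x acc)]

-- the scoring-and-selection cores agree on any chunk list
theorem core_eq (ql : String) (cs : List String) :
    ((PySem.List.sorted (cs.foldl (fun acc chunk =>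
        let score := scoreLoopA ql (PySem.Str.lower chunk)
        if 0 < score then acc ++ [(chunk, score)] else acc) []) (fun x => x.2) true).take 3).map (fun x => x.1)
    = (cs.foldl (fun top chunk =>
        let score := scoreB ((PySem.Str.split₀ ql).filter (fun w => decide (2 < PySem.Str.len w)))
            (3 * ((PySem.Str.split₀ ql).filter (fun w => decide (2 < PySem.Str.len w))).length)
            ql (PySem.Str.lower chunk)
        if 0 < score then insertTop3 (chunk, score) top else top) []).map (fun x => x.1) := by
  rw [foldl_appendIf_eq (fun c => scoreLoopA ql (PySem.Str.lower c)) cs []]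
  simp only [List.nil_append]
  rw [PySem.List.sorted_rev_eq_foldl_insertBy (α := String × Int) (κ := Int)
    ((cs.filter (fun c => decide (0 < scoreLoopA ql (PySem.Str.lower c)))).map
      (fun c => (c, scoreLoopA ql (PySem.Str.lower c)))) (fun x => x.2)]
  have h3 := foldl_insert_take (fun a b : String × Int => decide (b.2 < a.2))
    ((cs.filter (fun c => decide (0 < scoreLoopA ql (PySem.Str.lower c)))).map
      (fun c => (c, scoreLoopA ql (PySem.Str.lower c)))) []
  simp only [List.take_nil] at h3
  rw [← h3, List.foldl_map, List.foldl_filter]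
  congr 1
  apply PySem.List.foldl_congr_mem
  intro t c _
  have hs : scoreLoopA ql (PySem.Str.lower c)
      = scoreB ((PySem.Str.split₀ ql).filter (fun w => decide (2 < PySem.Str.len w)))
          (3 * ((PySem.Str.split₀ ql).filter (fun w => decide (2 < PySem.Str.len w))).length)
          ql (PySem.Str.lower c) := score_eq ql (PySem.Str.lower c)
  simp only [← hs, insertTop3, decide_eq_true_eq]

theorem search_relevant_content_eq (vectorstore : Option (List (String × List String))) (question : String) :
    search_relevant_content vectorstore question = search_relevant_content_alt vectorstore question := by
  cases vectorstore with
  | none => rfl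
  | some d =>
    unfold search_relevant_content search_relevant_content_alt
    by_cases hd : d = []
    · simp only [hd, if_true]
    · simp only [if_neg hd]
      generalize (PySem.Dict.mk d).get? "chunks" = r
      cases r with
      | none => rfl
      | some cs =>
        by_cases hc : cs = []
        · simp only [hc, if_true]
        · simp only [if_neg hc]
          exact core_eq (PySem.Str.lower question) cs

-- ===== VERDICT =====
theorem search_relevant_content_spec : Claim_equal_search_relevant_content := by
  intro vs q _
  unfold Spec_search_relevant_content
  exact search_relevant_content_eq vs q
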